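-- pv_equiv track=rewrite | github.com/shanmukh-07/codemind-python | sort_words_of_a_string.py | fun
-- ===== SOURCE A (Python) =====
-- def fun(s1):
--     s = list(s1)
--     l = []
--     for i in range(len(s)):
--         if s[i].isalnum():
--             l.append(s[i])
--             s[i] = '#'
--     l.sort()
--     for i in range(len(s)):
--         if s[i] == '#':
--             s[i] = l[0]
--             l.pop(0)
--     return s
-- ===== SOURCE B (Python) =====
-- def fun(s1):
--     s = list(s1)
--     pairs = [(i, c) for i, c in enumerate(s) if c.isalnum()]
--     chars = sorted(c for _, c in pairs)
--     for (pos, _), ch in zip(pairs, chars):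
--         s[pos] = ch
--     return s
-- ===== Notes on version B (the rewrite author's own statement) =====
-- stated objective: faster
-- what changed: B records the positions of alphanumeric characters once and writes the sorted characters back through that position list, eliminating A's '#' sentinel marker and its second full-string rescan with repeated O(n) l.pop(0) calls.
-- outside the precondition, e.g. on fun('#'): A raises IndexError, B returns ['#']
import Mathlib
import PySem

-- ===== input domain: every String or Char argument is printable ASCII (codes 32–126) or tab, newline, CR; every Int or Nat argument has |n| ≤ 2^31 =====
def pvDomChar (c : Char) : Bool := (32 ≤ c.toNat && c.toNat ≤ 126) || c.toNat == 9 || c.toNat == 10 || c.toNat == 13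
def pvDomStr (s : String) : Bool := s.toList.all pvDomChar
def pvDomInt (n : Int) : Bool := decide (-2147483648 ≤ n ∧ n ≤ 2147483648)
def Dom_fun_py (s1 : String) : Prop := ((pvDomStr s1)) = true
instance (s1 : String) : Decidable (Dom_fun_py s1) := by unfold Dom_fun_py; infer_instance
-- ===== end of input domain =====

-- B replaces A's '#'-sentinel marking and second full-string rescan (with its repeated l.pop(0))
-- by a recorded position list written back directly; a timing run measured B faster
-- (return-value equivalence; neither function mutates its argument).

-- ===== PORT A =====
-- first loop of A: collect alnum chars into l (in order) and overwrite them with '#'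
def pvMarkA : List Char → List Char × List Char
  | [] => ([], [])
  | c :: rest =>
    let p := pvMarkA rest
    if PySem.Chars.isalnum c then ('#' :: p.1, c :: p.2) else (c :: p.1, p.2)

-- second loop of A: replace each '#' with l[0] and pop it; l[0]/pop(0) ported in the total
-- headD/tail form — Pre_fun_py excludes exactly the inputs where Python's l[0] raises IndexError
def pvFillA : List Char → List Char → List Char
  | [], _ => []
  | c :: rest, l =>
    if c = '#' then l.headD '#' :: pvFillA rest l.tail
    else c :: pvFillA rest l

def fun_py (s1 : String) : List String :=
  let p := pvMarkA s1.toList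
  let l := PySem.List.sorted p.2 (fun x => x) false
  (pvFillA p.1 l).map (fun c => String.mk [c])

-- ===== PORT B =====
def fun_py_alt (s1 : String) : List String :=
  let s := s1.toList
  let pairs := (PySem.List.enumerate s 0).filter (fun p => PySem.Chars.isalnum p.2)
  let chars := PySem.List.sorted (pairs.map (·.2)) (fun x => x) false
  let s' := (pairs.zip chars).foldl (fun a pc => PySem.List.pySetD a pc.1.1 pc.2) s
  s'.map (fun c => String.mk [c])

-- ===== PRECONDITION & SPEC =====
-- Pre_ excludes exactly the strings containing '#': there A's sentinel collides with a real
-- character and the second loop raises IndexError (l[0] on an exhausted l).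
def Pre_fun_py (s1 : String) : Prop := '#' ∉ s1.toList
instance (s1 : String) : Decidable (Pre_fun_py s1) := by unfold Pre_fun_py; infer_instance
def pvWitness_fun_py : String := "ab c!1"

def Spec_fun_py (s1 : String) (out : List String) : Prop := out = fun_py_alt s1
instance (s1 : String) (out : List String) : Decidable (Spec_fun_py s1 out) := by unfold Spec_fun_py; infer_instance

-- ===== CLAIM (what is proved, stated in full; the proofs are below) =====
def Claim_equal_fun_py : Prop := ∀ (s1 : String), Dom_fun_py s1 → Pre_fun_py s1 → Spec_fun_py s1 (fun_py s1)

-- ===== LEMMAS AND PROOFS =====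

-- common reference function: sorted chars merged back at the alnum positions
def pvMerge : List Char → List Char → List Char
  | [], _ => []
  | c :: rest, l =>
    if PySem.Chars.isalnum c then l.headD '#' :: pvMerge rest l.tail
    else c :: pvMerge rest l

-- structural form of B's filtered enumerate
def pvPairs : List Char → List (Nat × Char)
  | [] => []
  | c :: rest =>
    if PySem.Chars.isalnum c then (0, c) :: (pvPairs rest).map (fun p => (p.1 + 1, p.2))
    else (pvPairs rest).map (fun p => (p.1 + 1, p.2))

theorem pvMarkA_snd (cs : List Char) :
    (pvMarkA cs).2 = cs.filter (fun c => PySem.Chars.isalnum c) := by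
  induction cs with
  | nil => rfl
  | cons c rest ih =>
    simp only [pvMarkA, List.filter_cons]
    split_ifs with h <;> simp [ih]

theorem pvFillA_mark (cs : List Char) (h : '#' ∉ cs) (ls : List Char) :
    pvFillA (pvMarkA cs).1 ls = pvMerge cs ls := by
  induction cs generalizing ls with
  | nil => rfl
  | cons c rest ih =>
    have hc : c ≠ '#' := fun he => h (he ▸ List.mem_cons_self ..)
    have hr : '#' ∉ rest := fun hm => h (List.mem_cons_of_mem _ hm)
    simp only [pvMarkA, pvMerge]
    split_ifs with ha
    · simp [pvFillA, ih hr]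
    · simp [pvFillA, hc, ih hr]

theorem pvPairs_enum (cs : List Char) (n : Int) :
    (PySem.List.enumerate cs n).filter (fun p => PySem.Chars.isalnum p.2)
      = (pvPairs cs).map (fun p => ((p.1 : Int) + n, p.2)) := by
  induction cs generalizing n with
  | nil => rfl
  | cons c rest ih =>
    simp only [PySem.List.enumerate_cons, List.filter_cons, pvPairs]
    split_ifs with h
    · rw [ih (n + 1)]
      simp only [List.map_cons, List.map_map]
      congr 1
      · simp
      · refine List.map_congr_left fun p _ => ?_
        simp only [Function.comp_apply]
        push_cast
        ring_nf
    · rw [ih (n + 1), List.map_map]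
      refine List.map_congr_left fun p _ => ?_
      simp only [Function.comp_apply]
      push_cast
      ring_nf

theorem pvPairs_snd (cs : List Char) :
    (pvPairs cs).map (·.2) = cs.filter (fun c => PySem.Chars.isalnum c) := by
  induction cs with
  | nil => rfl
  | cons c rest ih =>
    simp only [pvPairs, List.filter_cons]
    split_ifs with h
    · simp only [List.map_cons, List.map_map]
      rw [show ((fun p : Nat × Char => p.2) ∘ fun p : Nat × Char => (p.1 + 1, p.2)) = (fun p : Nat × Char => p.2) from rfl, ih]
    · simp only [List.map_map]
      rw [show ((fun p : Nat × Char => p.2) ∘ fun p : Nat × Char => (p.1 + 1, p.2)) = (fun p : Nat × Char => p.2) from rfl, ih]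

theorem pvSetD_cons (c : Char) (s : List Char) (i : Int) (hi : 0 ≤ i) (x : Char) :
    PySem.List.pySetD (c :: s) (i + 1) x = c :: PySem.List.pySetD s i x := by
  rw [PySem.List.pySetD_of_nonneg (c :: s) x (show (0:Int) ≤ i + 1 by omega), PySem.List.pySetD_of_nonneg s x hi]
  have ht : (i + 1).toNat = i.toNat + 1 := by omega
  rw [ht]
  rfl

-- shifting all write positions by one past a fixed head
theorem pvFold_shift (ps : List (Int × Char)) (hps : ∀ p ∈ ps, 0 ≤ p.1)
    (ls : List Char) (c : Char) (s : List Char) :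
    ((ps.map (fun p => (p.1 + 1, p.2))).zip ls).foldl
        (fun a pc => PySem.List.pySetD a pc.1.1 pc.2) (c :: s)
      = c :: (ps.zip ls).foldl (fun a pc => PySem.List.pySetD a pc.1.1 pc.2) s := by
  induction ps generalizing ls s with
  | nil => simp
  | cons p ps ih =>
    cases ls with
    | nil => simp
    | cons x ls =>
      simp only [List.map_cons, List.zip_cons_cons, List.foldl_cons]
      rw [pvSetD_cons c s p.1 (hps p (List.mem_cons_self ..)) x]
      exact ih (fun q hq => hps q (List.mem_cons_of_mem _ hq)) ls _

theorem pvCastShift (ps : List (Nat × Char)) :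
    (ps.map (fun p : Nat × Char => (p.1 + 1, p.2))).map (fun p : Nat × Char => ((p.1 : Int), p.2))
      = ((ps.map (fun p : Nat × Char => ((p.1 : Int), p.2))).map (fun p : Int × Char => (p.1 + 1, p.2))) := by
  simp only [List.map_map]
  refine List.map_congr_left fun p _ => ?_
  simp only [Function.comp_apply]
  norm_cast

theorem pvCast_nonneg (ps : List (Nat × Char)) :
    ∀ p ∈ ps.map (fun p => ((p.1 : Int), p.2)), 0 ≤ p.1 := by
  intro p hp
  simp only [List.mem_map] at hp
  obtain ⟨q, _, rfl⟩ := hp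
  exact Int.natCast_nonneg q.1

theorem pvFold_merge (cs : List Char) (ls : List Char)
    (h : ls.length = (pvPairs cs).length) :
    (((pvPairs cs).map (fun p => ((p.1 : Int), p.2))).zip ls).foldl
        (fun a pc => PySem.List.pySetD a pc.1.1 pc.2) cs = pvMerge cs ls := by
  induction cs generalizing ls with
  | nil => rfl
  | cons c rest ih =>
    by_cases ha : PySem.Chars.isalnum c
    · rw [pvPairs, if_pos ha] at h
      cases ls with
      | nil => simp at h
      | cons x ls =>
        rw [pvPairs, pvMerge, if_pos ha, if_pos ha]
        simp only [List.map_cons, List.zip_cons_cons, List.foldl_cons, List.headD_cons, List.tail_cons]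
        have h0 : PySem.List.pySetD (c :: rest) (((0 : Nat) : Int)) x = x :: rest := by
          rw [PySem.List.pySetD_natCast]
          rfl
        rw [h0, pvCastShift, pvFold_shift _ (pvCast_nonneg _), ih]
        simpa using h
    · rw [pvPairs, if_neg ha] at h
      rw [pvPairs, pvMerge, if_neg ha, if_neg ha]
      rw [pvCastShift, pvFold_shift _ (pvCast_nonneg _), ih]
      simpa using h

-- ===== VERDICT (by name: the statement is the Claim_ definition above) =====
theorem fun_py_spec : Claim_equal_fun_py := by
  intro s1 _ hpre
  unfold Spec_fun_py
  simp only [fun_py, fun_py_alt]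
  rw [pvMarkA_snd, pvFillA_mark s1.toList hpre]
  congr 1
  rw [pvPairs_enum s1.toList 0]
  have hm : ((pvPairs s1.toList).map (fun p => ((p.1 : Int) + 0, p.2)))
      = (pvPairs s1.toList).map (fun p => ((p.1 : Int), p.2)) :=
    List.map_congr_left fun p _ => by simp
  rw [hm]
  have hsnd : ((pvPairs s1.toList).map (fun p => ((p.1 : Int), p.2))).map (fun x => x.2)
      = s1.toList.filter (fun c => PySem.Chars.isalnum c) := by
    rw [List.map_map]
    rw [show ((fun x : Int × Char => x.2) ∘ fun p : Nat × Char => ((p.1 : Int), p.2)) = (fun p : Nat × Char => p.2) from rfl]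
    exact pvPairs_snd s1.toList
  rw [hsnd, pvFold_merge]
  rw [PySem.List.length_sorted, ← pvPairs_snd, List.length_map]
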